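-- pv_equiv track=rewrite | github.com/surrye2/shadow-tool | modules/jwt_token_analyzer.py | _assess_risk
-- ===== SOURCE A (Python) =====
-- from typing import List, Dict, Optional
--
-- def _assess_risk(algorithm: str, expired: bool, issues: List[str]) -> str:
--     """Assess token risk"""
--     if any('CRITICAL' in i for i in issues):
--         return "CRITICAL"
--     if any('HIGH' in i for i in issues):
--         return "HIGH"
--     if any('WARNING' in i for i in issues):
--         return "HIGH"
--     if algorithm in ['HS256', 'HS384', 'HS512']:
--         return "MEDIUM"
--     if expired:
--         return "LOW (Expired)"
--     return "LOW"
-- ===== SOURCE B (Python) =====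
-- def _issue_score(issue: str) -> int:
--     """Numeric severity of one issue line."""
--     if 'CRITICAL' in issue:
--         return 3
--     if 'HIGH' in issue or 'WARNING' in issue:
--         return 2
--     return 0
--
-- def _assess_risk(algorithm: str, expired: bool, issues):
--     """Assess token risk: score each issue numerically, reduce by max,
--     fold in the algorithm-based baseline, decode the level to a label."""
--     base = 1 if algorithm in ('HS256', 'HS384', 'HS512') else 0
--     level = max((_issue_score(i) for i in issues), default=0)
--     level = max(level, base)
--     if level >= 3:
--         return "CRITICAL"
--     if level == 2:
--         return "HIGH"
--     if level == 1:
--         return "MEDIUM"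
--     return "LOW (Expired)" if expired else "LOW"
-- ===== Notes on version B (the rewrite author's own statement) =====
-- stated objective: alternative
-- what changed: Replaces A's cascade of any() substring scans and string branches with a numeric severity scoring: each issue is mapped to a score, the scores are reduced by max together with an algorithm-based baseline, and the resulting level is decoded to a label.
import Mathlib
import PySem

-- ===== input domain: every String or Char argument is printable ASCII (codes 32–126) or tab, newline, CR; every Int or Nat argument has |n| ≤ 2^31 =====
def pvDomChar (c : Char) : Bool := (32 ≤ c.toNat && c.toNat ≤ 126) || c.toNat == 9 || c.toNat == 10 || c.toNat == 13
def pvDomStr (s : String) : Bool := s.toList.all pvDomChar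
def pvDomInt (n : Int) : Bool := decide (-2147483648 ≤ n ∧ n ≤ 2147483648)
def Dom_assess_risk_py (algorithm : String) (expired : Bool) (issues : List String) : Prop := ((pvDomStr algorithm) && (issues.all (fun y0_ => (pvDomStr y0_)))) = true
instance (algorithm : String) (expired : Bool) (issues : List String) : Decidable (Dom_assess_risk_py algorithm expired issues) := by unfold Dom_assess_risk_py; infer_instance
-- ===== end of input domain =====

-- B replaces A's cascade of any() scans and string branches with a numeric
-- severity score per issue, a max-reduction, and a level-to-label decoding
-- (objective: alternative).

-- ===== PORT A =====
def assess_risk_py (algorithm : String) (expired : Bool) (issues : List String) : String :=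
  if issues.any (fun i => PySem.Str.isIn "CRITICAL" i) then "CRITICAL"
  else if issues.any (fun i => PySem.Str.isIn "HIGH" i) then "HIGH"
  else if issues.any (fun i => PySem.Str.isIn "WARNING" i) then "HIGH"
  else if algorithm ∈ ["HS256", "HS384", "HS512"] then "MEDIUM"
  else if expired then "LOW (Expired)"
  else "LOW"

-- ===== PORT B =====
def issueScore (issue : String) : Int :=
  if PySem.Str.isIn "CRITICAL" issue then 3
  else if PySem.Str.isIn "HIGH" issue || PySem.Str.isIn "WARNING" issue then 2
  else 0

def assess_risk_py_alt (algorithm : String) (expired : Bool) (issues : List String) : String :=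
  let base : Int := if algorithm = "HS256" ∨ algorithm = "HS384" ∨ algorithm = "HS512" then 1 else 0
  let level0 : Int := issues.foldl (fun m i => max m (issueScore i)) 0
  let level : Int := max level0 base
  if level ≥ 3 then "CRITICAL"
  else if level = 2 then "HIGH"
  else if level = 1 then "MEDIUM"
  else if expired then "LOW (Expired)"
  else "LOW"

-- ===== PRECONDITION & SPEC =====
def Spec_assess_risk_py (algorithm : String) (expired : Bool) (issues : List String) (out : String) : Prop := out = assess_risk_py_alt algorithm expired issues
instance (algorithm : String) (expired : Bool) (issues : List String) (out : String) : Decidable (Spec_assess_risk_py algorithm expired issues out) := by unfold Spec_assess_risk_py; infer_instance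

-- ===== CLAIM (what is proved, stated in full; the proofs are below) =====
def Claim_equal_assess_risk_py : Prop := ∀ (algorithm : String) (expired : Bool) (issues : List String), Dom_assess_risk_py algorithm expired issues → Spec_assess_risk_py algorithm expired issues (assess_risk_py algorithm expired issues)

-- ===== LEMMAS AND PROOFS =====
-- one fold step of the max-reduction, on the boolean skeleton
theorem max_step (a : Int) (c h2 ct ht : Bool) :
    max (max a (if c then (3:Int) else if h2 then 2 else 0))
        (if ct then (3:Int) else if ht then 2 else 0)
      = max a (if c || ct then (3:Int) else if h2 || ht then 2 else 0) := by
  cases c <;> cases h2 <;> cases ct <;> cases ht <;> simp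

-- characterisation of the max-reduction by the three `any` scans of A
theorem score_fold (issues : List String) (a : Int) (ha : 0 ≤ a) :
    issues.foldl (fun m i => max m (issueScore i)) a
      = max a (if issues.any (fun i => PySem.Str.isIn "CRITICAL" i) then 3
               else if issues.any (fun i => PySem.Str.isIn "HIGH" i || PySem.Str.isIn "WARNING" i) then 2
               else 0) := by
  induction issues generalizing a with
  | nil => simpa using (max_eq_left ha).symm
  | cons h t ih =>
    simp only [List.foldl_cons, List.any_cons]
    rw [ih (max a (issueScore h)) (le_trans ha (le_max_left _ _))]
    unfold issueScore
    exact max_step a (PySem.Str.isIn "CRITICAL" h)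
      (PySem.Str.isIn "HIGH" h || PySem.Str.isIn "WARNING" h)
      (t.any (fun i => PySem.Str.isIn "CRITICAL" i))
      (t.any (fun i => PySem.Str.isIn "HIGH" i || PySem.Str.isIn "WARNING" i))

-- splitting A's two scans out of B's combined predicate
theorem any_or_split (issues : List String) :
    issues.any (fun i => PySem.Str.isIn "HIGH" i || PySem.Str.isIn "WARNING" i)
      = (issues.any (fun i => PySem.Str.isIn "HIGH" i) || issues.any (fun i => PySem.Str.isIn "WARNING" i)) := by
  induction issues with
  | nil => rfl
  | cons h t ih =>
    simp only [List.any_cons, ih]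
    cases PySem.Str.isIn "HIGH" h <;> cases PySem.Str.isIn "WARNING" h <;> simp

-- ===== VERDICT (by name: the statement is the Claim_ definition above) =====
theorem assess_risk_py_spec : Claim_equal_assess_risk_py := by
  intro algorithm expired issues _
  unfold Spec_assess_risk_py assess_risk_py assess_risk_py_alt
  rw [score_fold issues 0 le_rfl]
  rw [any_or_split issues]
  cases hc : issues.any (fun i => PySem.Str.isIn "CRITICAL" i) <;>
    cases hh : issues.any (fun i => PySem.Str.isIn "HIGH" i) <;>
      cases hw : issues.any (fun i => PySem.Str.isIn "WARNING" i) <;>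
        by_cases halg : algorithm = "HS256" ∨ algorithm = "HS384" ∨ algorithm = "HS512" <;>
          cases expired <;>
            simp_all
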